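-- pv_equiv track=rewrite | github.com/troyunverdruss/advent-of-code-2019 | days/day22/day22.py | compute_coefficients_reverse
-- ===== SOURCE A (Python) =====
-- def compute_coefficients_reverse(cards_count, lines):
--     # a, b, as in y = ax + b
--     # 1, 0 => exact same positions as it started/was
--     a, b = 1, 0
--     reversed_lines = lines[:]
--     reversed_lines.reverse()
--     for step in reversed_lines:
--         if "deal with increment" in step:
--             inc = int(step.split(" ")[3])
--             temp_a = modinv(inc, cards_count)
--             temp_b = 0
--         elif "deal into new stack" in step:
--             temp_a = -1
--             temp_b = cards_count - 1
--         elif "cut" in step: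
--             cut = int(step.split(" ")[1])
--             temp_a = 1
--             temp_b = cut
--         else:
--             raise Exception("Unknown command: ", step)
--         # Combine the values from this step with the running tallies
--         a = (a * temp_a) % cards_count
--         b = (temp_a * b + temp_b) % cards_count
--     return a, b
--
-- def egcd(a, b):
--     if a == 0:
--         return (b, 0, 1)
--     else:
--         g, y, x = egcd(b % a, a)
--         return (g, x - (b // a) * y, y)
--
-- def modinv(a, m):
--     g, x, y = egcd(a, m)
--     if g != 1:
--         raise Exception('modular inverse does not exist')
--     else:
--         return x % m
-- ===== SOURCE B (Python) =====
-- def egcd(a, b):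
--     if a == 0:
--         return (b, 0, 1)
--     else:
--         g, y, x = egcd(b % a, a)
--         return (g, x - (b // a) * y, y)
--
-- def modinv(a, m):
--     g, x, y = egcd(a, m)
--     if g != 1:
--         raise Exception('modular inverse does not exist')
--     else:
--         return x % m
--
-- def _line_coeffs(cards_count, step):
--     # forward transform of one line: new_pos = ta * pos + tb
--     if "deal with increment" in step:
--         return (int(step.split(" ")[3]), 0)
--     if "deal into new stack" in step:
--         return (-1, cards_count - 1)
--     if "cut" in step:
--         return (1, -int(step.split(" ")[1]))
--     raise Exception("Unknown command: ", step)
--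
-- def compute_coefficients_reverse(cards_count, lines):
--     # Stage 1: parse every line to its forward coefficients.
--     pairs = [_line_coeffs(cards_count, step) for step in lines]
--     # Stage 2: compose them exactly (no modular reduction, no per-step inverse).
--     A, B = 1, 0
--     for ta, tb in pairs:
--         A, B = A * ta, ta * B + tb
--     # Stage 3: invert the accumulated transform once.
--     a = modinv(A % cards_count, cards_count)
--     b = (-a * B) % cards_count
--     return a, b
-- ===== Notes on version B (the rewrite author's own statement) =====
-- stated objective: alternative
-- what changed: B is staged: it first parses all lines into a list of forward (ta,tb) coefficient pairs, then composes them with exact integer arithmetic (no modular reduction and no per-step modular inverse in the loop, unlike A's reversed iteration with an egcd-based inverse per 'deal with increment' line), and finally inverts the accumulated linear transform with a single modinv.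
-- outside the precondition, e.g. on compute_coefficients_reverse(1, []): A returns (1, 0), B returns (0, 0); on compute_coefficients_reverse(-5, []): A returns (1, 0), B raises Exception; on compute_coefficients_reverse(-7, ['cut 3']): A returns (-6, -4), B raises Exception
import Mathlib
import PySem

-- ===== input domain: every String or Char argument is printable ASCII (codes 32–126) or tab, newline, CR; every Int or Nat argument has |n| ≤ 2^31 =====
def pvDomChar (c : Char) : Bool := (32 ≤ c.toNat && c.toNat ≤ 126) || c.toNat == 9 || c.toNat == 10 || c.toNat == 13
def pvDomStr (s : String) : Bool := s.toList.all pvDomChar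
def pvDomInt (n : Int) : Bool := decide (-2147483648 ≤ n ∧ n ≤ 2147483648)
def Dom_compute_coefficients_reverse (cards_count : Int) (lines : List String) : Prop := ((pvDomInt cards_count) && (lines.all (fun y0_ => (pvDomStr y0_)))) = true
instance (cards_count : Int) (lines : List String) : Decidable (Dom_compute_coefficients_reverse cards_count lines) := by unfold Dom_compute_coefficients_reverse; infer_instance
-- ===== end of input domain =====

-- B stages the work: parse all lines into forward coefficient pairs, compose them with exact
-- (unreduced) integer arithmetic, then invert the accumulated transform with one final modinv,
-- instead of A's reversed fold that reduces mod cards_count and takes a modular inverse per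
-- 'deal with increment' step (objective: alternative).

-- ===== PORT A =====
-- shared helper of both Pythons: egcd / modinv, literal ports
theorem pv_mod_natAbs_lt (b : Int) {a : Int} (ha : a ≠ 0) :
    (PySem.Int.mod b a).natAbs < a.natAbs := by
  rcases lt_or_gt_of_ne ha with h | h
  · have := PySem.Int.mod_neg_bounds b h; omega
  · have h1 := PySem.Int.mod_nonneg b h; have h2 := PySem.Int.mod_lt b h; omega

def egcdP (a b : Int) : Int × Int × Int :=
  if a = 0 then (b, 0, 1)
  else
    let r := egcdP (PySem.Int.mod b a) a
    (r.1, r.2.2 - (PySem.Int.floordiv b a) * r.2.1, r.2.1)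
termination_by a.natAbs
decreasing_by exact pv_mod_natAbs_lt b (by assumption)

def modinvP (a m : Int) : Option Int :=
  let r := egcdP a m
  if r.1 ≠ 1 then none else PySem.Int.mod? r.2.1 m

-- int(step.split(" ")[i])
def parseIntAt (stp : String) (i : Int) : Option Int :=
  ((PySem.Str.split? stp " ").bind (fun parts => PySem.List.pyGet? parts i)).bind PySem.Int.ofStr?

-- one iteration of A's loop (state none = an exception has been raised)
def stepA (m : Int) (st : Option (Int × Int)) (stp : String) : Option (Int × Int) :=
  match st with
  | none => none
  | some (a, b) =>
    (if PySem.Str.isIn "deal with increment" stp then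
      (parseIntAt stp 3).bind (fun inc => (modinvP inc m).map (fun ta => (ta, (0 : Int))))
    else if PySem.Str.isIn "deal into new stack" stp then
      some ((-1 : Int), m - 1)
    else if PySem.Str.isIn "cut" stp then
      (parseIntAt stp 1).map (fun cut => ((1 : Int), cut))
    else none).bind (fun t =>
      (PySem.Int.mod? (a * t.1) m).bind (fun a' =>
        (PySem.Int.mod? (t.1 * b + t.2) m).map (fun b' => (a', b'))))

def compute_coefficients_reverse (cards_count : Int) (lines : List String) : Int × Int :=
  (lines.reverse.foldl (stepA cards_count) (some (1, 0))).getD (0, 0)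

-- ===== PORT B =====
-- _line_coeffs: forward coefficients of one line (none = exception)
def lineCoeffs (m : Int) (stp : String) : Option (Int × Int) :=
  if PySem.Str.isIn "deal with increment" stp then
    (parseIntAt stp 3).map (fun i => (i, (0 : Int)))
  else if PySem.Str.isIn "deal into new stack" stp then some ((-1 : Int), m - 1)
  else if PySem.Str.isIn "cut" stp then (parseIntAt stp 1).map (fun n => ((1 : Int), -n))
  else none

-- stage 1: the list comprehension (an exception anywhere aborts the whole list)
def parseAll (m : Int) : List String → Option (List (Int × Int))
  | [] => some []
  | l :: L => (lineCoeffs m l).bind (fun t => (parseAll m L).map (fun ts => t :: ts))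

-- stage 2's loop body: exact composition, no reduction
def mstep (p t : Int × Int) : Int × Int := (p.1 * t.1, t.1 * p.2 + t.2)

def compute_coefficients_reverse_alt (cards_count : Int) (lines : List String) : Int × Int :=
  match parseAll cards_count lines with
  | none => (0, 0)
  | some pairs =>
    let p := pairs.foldl mstep (1, 0)
    match PySem.Int.mod? p.1 cards_count with
    | none => (0, 0)
    | some A' =>
      match modinvP A' cards_count with
      | none => (0, 0)
      | some a =>
        match PySem.Int.mod? (-a * p.2) cards_count with
        | none => (0, 0)
        | some b => (a, b)

-- ===== PRECONDITION & SPEC =====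
def validLine (m : Int) (stp : String) : Bool :=
  if PySem.Str.isIn "deal with increment" stp then
    match parseIntAt stp 3 with
    | some i => decide (0 < i) && (Int.gcd i m == 1)
    | none => false
  else if PySem.Str.isIn "deal into new stack" stp then true
  else if PySem.Str.isIn "cut" stp then (parseIntAt stp 1).isSome
  else false

-- Pre_ excludes: inputs where A raises (cards_count = 0 with steps, a malformed line, a
-- non-positive or non-coprime increment); negative cards_count, where A returns but B's single
-- final inversion raises the same 'modular inverse does not exist' exception; and the
-- empty-lines corner with cards_count < 2, where A's unreduced seed (1, 0) and B's reduced
-- representative of the identity transform are both defensible conventions.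
def Pre_compute_coefficients_reverse (cards_count : Int) (lines : List String) : Prop :=
  0 < cards_count ∧ (lines = [] → 2 ≤ cards_count) ∧ lines.all (validLine cards_count) = true
instance (cards_count : Int) (lines : List String) : Decidable (Pre_compute_coefficients_reverse cards_count lines) := by unfold Pre_compute_coefficients_reverse; infer_instance

def pvWitness_compute_coefficients_reverse : Int × List String :=
  (11, ["cut 3", "deal into new stack", "deal with increment 7", "cut -4"])

def Spec_compute_coefficients_reverse (cards_count : Int) (lines : List String) (out : Int × Int) : Prop := out = compute_coefficients_reverse_alt cards_count lines
instance (cards_count : Int) (lines : List String) (out : Int × Int) : Decidable (Spec_compute_coefficients_reverse cards_count lines out) := by unfold Spec_compute_coefficients_reverse; infer_instance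

-- ===== CLAIM (what is proved, stated in full; the proofs are below) =====
def Claim_equal_compute_coefficients_reverse : Prop := ∀ (cards_count : Int) (lines : List String), Dom_compute_coefficients_reverse cards_count lines → Pre_compute_coefficients_reverse cards_count lines → Spec_compute_coefficients_reverse cards_count lines (compute_coefficients_reverse cards_count lines)

-- ===== LEMMAS AND PROOFS =====

-- Bezout property of the ported egcd
theorem egcdP_bezout (a b : Int) :
    a * (egcdP a b).2.1 + b * (egcdP a b).2.2 = (egcdP a b).1 := by
  by_cases h : a = 0
  · subst h; simp [egcdP]
  · rw [egcdP]; simp only [h, if_false]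
    have ih := egcdP_bezout (PySem.Int.mod b a) a
    have hd := PySem.Int.floordiv_mul_add_mod b a
    linear_combination ih - (egcdP (PySem.Int.mod b a) a).2.1 * hd
termination_by a.natAbs
decreasing_by exact pv_mod_natAbs_lt b (by assumption)

-- the ported egcd returns the gcd on nonnegative arguments
theorem egcdP_gcd (a b : Int) (ha : 0 ≤ a) (hb : 0 ≤ b) :
    (egcdP a b).1 = (Int.gcd a b : Int) := by
  by_cases h : a = 0
  · subst h; simp [egcdP, Int.gcd, Int.natAbs_of_nonneg hb]
  · rw [egcdP]; simp only [h, if_false]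
    have hpos : 0 < a := lt_of_le_of_ne ha (Ne.symm h)
    have hmod : PySem.Int.mod b a = b % a := PySem.Int.mod_eq_emod_of_pos hpos
    have ih := egcdP_gcd (PySem.Int.mod b a) a (by rw [hmod]; exact Int.emod_nonneg b h) ha
    rw [ih, hmod, Int.gcd_emod, Int.gcd_comm]
termination_by a.natAbs
decreasing_by exact pv_mod_natAbs_lt b (by assumption)

-- modinv correctness: on a coprime nonnegative argument modulo positive m it returns the
-- canonical inverse
theorem modinvP_some (a m : Int) (hm : 0 < m) (ha : 0 ≤ a) (hg : Int.gcd a m = 1) :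
    ∃ r, modinvP a m = some r ∧ 0 ≤ r ∧ r < m ∧ Int.ModEq m (a * r) 1 := by
  have hg' : (egcdP a m).1 = 1 := by rw [egcdP_gcd a m ha (le_of_lt hm), hg]; rfl
  have hb := egcdP_bezout a m
  refine ⟨PySem.Int.mod (egcdP a m).2.1 m, ?_, PySem.Int.mod_nonneg _ hm, PySem.Int.mod_lt _ hm, ?_⟩
  · have hm0 : m ≠ 0 := by omega
    unfold modinvP
    simp [hg', PySem.Int.mod?, PySem.Int.mod, hm0]
  · rw [PySem.Int.mod_eq_emod_of_pos hm]
    calc a * ((egcdP a m).2.1 % m) ≡ a * (egcdP a m).2.1 [ZMOD m] :=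
          (Int.mod_modEq _ m).mul_left a
      _ ≡ a * (egcdP a m).2.1 + m * (egcdP a m).2.2 [ZMOD m] := by
          exact (Int.modEq_iff_dvd.2 ⟨-(egcdP a m).2.2, by ring⟩).symm
      _ = 1 := by rw [hb, hg']

-- A's reduced fold step
def rstep (m : Int) (p : Int × Int) (t : Int × Int) : Int × Int :=
  (PySem.Int.mod (p.1 * t.1) m, PySem.Int.mod (t.1 * p.2 + t.2) m)

-- forward / inverse coefficients of one valid line
def fwdCo (m : Int) (stp : String) : Int × Int :=
  if PySem.Str.isIn "deal with increment" stp then ((parseIntAt stp 3).getD 0, 0)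
  else if PySem.Str.isIn "deal into new stack" stp then (-1, m - 1)
  else (1, -(parseIntAt stp 1).getD 0)
def invCo (m : Int) (stp : String) : Int × Int :=
  if PySem.Str.isIn "deal with increment" stp then ((modinvP ((parseIntAt stp 3).getD 0) m).getD 0, 0)
  else if PySem.Str.isIn "deal into new stack" stp then (-1, m - 1)
  else (1, (parseIntAt stp 1).getD 0)

theorem stepA_some (m : Int) (hm : 0 < m) (stp : String) (h : validLine m stp = true)
    (p : Int × Int) : stepA m (some p) stp = some (rstep m p (invCo m stp)) := by
  have hm0 : m ≠ 0 := by omega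
  by_cases h1 : PySem.Str.isIn "deal with increment" stp = true
  · simp at h1
    cases hp : parseIntAt stp 3 with
    | none => simp [validLine, h1, hp] at h
    | some i =>
      simp [validLine, h1, hp] at h
      obtain ⟨r, hr, _, _, _⟩ := modinvP_some i m hm (le_of_lt h.1) h.2
      simp [stepA, invCo, rstep, h1, hp, hr, PySem.Int.mod?, PySem.Int.mod, hm0]
  · by_cases h2 : PySem.Str.isIn "deal into new stack" stp = true
    · simp at h1 h2
      simp [stepA, invCo, rstep, h1, h2, PySem.Int.mod?, PySem.Int.mod, hm0]
    · by_cases h3 : PySem.Str.isIn "cut" stp = true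
      · simp at h1 h2 h3
        cases hp : parseIntAt stp 1 with
        | none => simp [validLine, h1, h2, h3, hp] at h
        | some n => simp [stepA, invCo, rstep, h1, h2, h3, hp, PySem.Int.mod?, PySem.Int.mod, hm0]
      · simp at h1 h2 h3
        simp [validLine, h1, h2, h3] at h

-- B's parser succeeds on a valid line and returns the forward coefficients
theorem lineCoeffs_some (m : Int) (stp : String) (h : validLine m stp = true) :
    lineCoeffs m stp = some (fwdCo m stp) := by
  by_cases h1 : PySem.Str.isIn "deal with increment" stp = true
  · simp at h1
    cases hp : parseIntAt stp 3 with
    | none => simp [validLine, h1, hp] at h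
    | some i => simp [lineCoeffs, fwdCo, h1, hp]
  · by_cases h2 : PySem.Str.isIn "deal into new stack" stp = true
    · simp at h1 h2
      simp [lineCoeffs, fwdCo, h1, h2]
    · by_cases h3 : PySem.Str.isIn "cut" stp = true
      · simp at h1 h2 h3
        cases hp : parseIntAt stp 1 with
        | none => simp [validLine, h1, h2, h3, hp] at h
        | some n => simp [lineCoeffs, fwdCo, h1, h2, h3, hp]
      · simp at h1 h2 h3
        simp [validLine, h1, h2, h3] at h

-- stage 1 on an all-valid list
theorem parseAll_eq (m : Int) (L : List String) (h : ∀ s ∈ L, validLine m s = true) :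
    parseAll m L = some (L.map (fwdCo m)) := by
  induction L with
  | nil => rfl
  | cons l L ih =>
    rw [parseAll, lineCoeffs_some m l (h l (by simp)),
        ih (fun s hs => h s (by simp [hs]))]
    rfl

-- A's fold of valid steps never raises and computes the reduced fold
theorem foldA_eq (m : Int) (hm : 0 < m) (L : List String)
    (h : ∀ s ∈ L, validLine m s = true) (p : Int × Int) :
    L.foldl (stepA m) (some p) = some (L.foldl (fun q s => rstep m q (invCo m s)) p) := by
  induction L generalizing p with
  | nil => rfl
  | cons l L ih =>
    simp only [List.foldl_cons, stepA_some m hm l (h l (by simp)) p]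
    exact ih (fun s hs => h s (by simp [hs])) _

-- per-line algebra: the inverse coefficients really invert the forward ones (mod m)
theorem line_inv_mul (m : Int) (hm : 0 < m) (stp : String) (h : validLine m stp = true) :
    Int.ModEq m ((invCo m stp).1 * (fwdCo m stp).1) 1 := by
  by_cases h1 : PySem.Str.isIn "deal with increment" stp = true
  · have h1' := h1; simp at h1'
    cases hp : parseIntAt stp 3 with
    | none => simp [validLine, h1', hp] at h
    | some i =>
      simp [validLine, h1', hp] at h
      obtain ⟨r, hr, _, _, hri⟩ := modinvP_some i m hm (le_of_lt h.1) h.2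
      simp only [invCo, fwdCo]
      rw [if_pos h1, if_pos h1, hp]
      simp only [Option.getD_some, hr]
      calc r * i = i * r := by ring
        _ ≡ 1 [ZMOD m] := hri
  · by_cases h2 : PySem.Str.isIn "deal into new stack" stp = true
    · simp only [invCo, fwdCo]
      rw [if_neg h1, if_neg h1, if_pos h2, if_pos h2]
      norm_num
    · simp only [invCo, fwdCo]
      rw [if_neg h1, if_neg h1, if_neg h2, if_neg h2]
      norm_num

theorem line_inv_add (m : Int) (_hm : 0 < m) (stp : String) (_h : validLine m stp = true) :
    Int.ModEq m ((fwdCo m stp).1 * (invCo m stp).2 + (fwdCo m stp).2) 0 := by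
  by_cases h1 : PySem.Str.isIn "deal with increment" stp = true
  · simp only [invCo, fwdCo]
    rw [if_pos h1, if_pos h1]
    norm_num
  · by_cases h2 : PySem.Str.isIn "deal into new stack" stp = true
    · simp only [invCo, fwdCo]
      rw [if_neg h1, if_neg h1, if_pos h2, if_pos h2]
      have e : (-1 : Int) * (m - 1) + (m - 1) = 0 := by ring
      rw [e]
    · simp only [invCo, fwdCo]
      rw [if_neg h1, if_neg h1, if_neg h2, if_neg h2]
      have e : (1 : Int) * (parseIntAt stp 1).getD 0 + -(parseIntAt stp 1).getD 0 = 0 := by ring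
      rw [e]

-- the reduced fold is congruent (mod m) to the exact fold
theorem rfold_modeq (m : Int) (hm : 0 < m) (ts : List (Int × Int)) (p q : Int × Int)
    (h1 : Int.ModEq m p.1 q.1) (h2 : Int.ModEq m p.2 q.2) :
    Int.ModEq m (ts.foldl (rstep m) p).1 (ts.foldl mstep q).1 ∧
    Int.ModEq m (ts.foldl (rstep m) p).2 (ts.foldl mstep q).2 := by
  induction ts generalizing p q with
  | nil => exact ⟨h1, h2⟩
  | cons t ts ih =>
    refine ih _ _ ?_ ?_
    · show Int.ModEq m (PySem.Int.mod (p.1 * t.1) m) (q.1 * t.1)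
      rw [PySem.Int.mod_eq_emod_of_pos hm]
      exact (Int.mod_modEq _ m).trans (h1.mul_right t.1)
    · show Int.ModEq m (PySem.Int.mod (t.1 * p.2 + t.2) m) (t.1 * q.2 + t.2)
      rw [PySem.Int.mod_eq_emod_of_pos hm]
      exact (Int.mod_modEq _ m).trans ((h2.mul_left t.1).add_right t.2)

-- on a nonempty list the reduced fold lands in [0, m)
theorem rfold_bounds (m : Int) (hm : 0 < m) (ts : List (Int × Int)) (hne : ts ≠ []) (p : Int × Int) :
    (0 ≤ (ts.foldl (rstep m) p).1 ∧ (ts.foldl (rstep m) p).1 < m) ∧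
    (0 ≤ (ts.foldl (rstep m) p).2 ∧ (ts.foldl (rstep m) p).2 < m) := by
  induction ts generalizing p with
  | nil => exact absurd rfl hne
  | cons t ts ih =>
    rcases eq_or_ne ts [] with h | h
    · subst h
      exact ⟨⟨PySem.Int.mod_nonneg _ hm, PySem.Int.mod_lt _ hm⟩,
             ⟨PySem.Int.mod_nonneg _ hm, PySem.Int.mod_lt _ hm⟩⟩
    · exact ih h _

-- the exact forward fold is linear in its start state
theorem mfold_linear (ts : List (Int × Int)) (p : Int × Int) :
    ts.foldl mstep p = ((ts.foldl mstep (1, 0)).1 * p.1,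
                        (ts.foldl mstep (1, 0)).1 * p.2 + (ts.foldl mstep (1, 0)).2) := by
  induction ts generalizing p with
  | nil => simp
  | cons t ts ih =>
    rw [List.foldl_cons, List.foldl_cons, ih (mstep p t), ih (mstep (1, 0) t)]
    simp only [mstep, Prod.mk.injEq]; constructor <;> ring

-- one algebraic composition step of the core invariant
theorem core_step (m a' b' A' B' ia ib ta tb : Int)
    (ih1 : Int.ModEq m (a' * A') 1) (ih2 : Int.ModEq m (A' * b' + B') 0)
    (h1 : Int.ModEq m (ia * ta) 1) (h2 : Int.ModEq m (ta * ib + tb) 0) :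
    Int.ModEq m ((a' * ia) * (A' * (1 * ta))) 1 ∧
    Int.ModEq m ((A' * (1 * ta)) * (ia * b' + ib) + (A' * (ta * 0 + tb) + B')) 0 := by
  constructor
  · calc (a' * ia) * (A' * (1 * ta)) = (a' * A') * (ia * ta) := by ring
      _ ≡ 1 * 1 [ZMOD m] := ih1.mul h1
      _ = 1 := by ring
  · calc (A' * (1 * ta)) * (ia * b' + ib) + (A' * (ta * 0 + tb) + B')
        = (ia * ta) * (A' * b') + (A' * (ta * ib + tb) + B') := by ring
      _ ≡ 1 * (A' * b') + (A' * 0 + B') [ZMOD m] := (h1.mul_right _).add ((h2.mul_left A').add_right B')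
      _ = A' * b' + B' := by ring
      _ ≡ 0 [ZMOD m] := ih2

-- core algebra: the reverse fold of inverse coefficients inverts the forward fold (mod m)
theorem core (m : Int) (hm : 0 < m) (L : List String) (h : ∀ s ∈ L, validLine m s = true) :
    Int.ModEq m (((L.reverse.map (invCo m)).foldl mstep (1, 0)).1
                  * ((L.map (fwdCo m)).foldl mstep (1, 0)).1) 1 ∧
    Int.ModEq m (((L.map (fwdCo m)).foldl mstep (1, 0)).1
                  * ((L.reverse.map (invCo m)).foldl mstep (1, 0)).2
                  + ((L.map (fwdCo m)).foldl mstep (1, 0)).2) 0 := by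
  induction L with
  | nil => constructor <;> simp [Int.ModEq.refl]
  | cons l L ih =>
    obtain ⟨ih1, ih2⟩ := ih (fun s hs => h s (List.mem_cons_of_mem _ hs))
    have hl := h l List.mem_cons_self
    have hmul := line_inv_mul m hm l hl
    have hadd := line_inv_add m hm l hl
    rw [List.reverse_cons, List.map_append, List.foldl_append, List.map_cons, List.map_cons]
    simp only [List.foldl_cons, List.map_nil, List.foldl_nil]
    rw [mfold_linear (L.map (fwdCo m)) (mstep (1, 0) (fwdCo m l))]
    simp only [mstep]
    exact core_step m _ _ _ _ _ _ _ _ ih1 ih2 hmul hadd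

-- congruent values reduced into [0, m) are equal
theorem eq_of_modeq_bounds {m x y : Int} (h : Int.ModEq m x y)
    (hx : 0 ≤ x ∧ x < m) (hy : 0 ≤ y ∧ y < m) : x = y := by
  have := h.symm
  unfold Int.ModEq at this
  rw [Int.emod_eq_of_lt hx.1 hx.2, Int.emod_eq_of_lt hy.1 hy.2] at this
  omega

-- mod of 1 for modulus at least 2
theorem pymod_one (m : Int) (h2 : 2 ≤ m) : PySem.Int.mod 1 m = 1 := by
  rw [PySem.Int.mod_eq_emod_of_pos (by omega), Int.emod_eq_of_lt (by norm_num) (by omega)]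

-- modinv of 1 is 1 for modulus at least 2 (the empty-lines case)
theorem modinvP_one (m : Int) (h2 : 2 ≤ m) : modinvP 1 m = some 1 := by
  have e0 : egcdP 0 1 = (1, 0, 1) := by rw [egcdP]; simp
  have e1 : egcdP 1 m = (1, 1, 0) := by
    rw [egcdP]; simp [e0]
  have hf : Int.fmod 1 m = 1 := by
    simpa [PySem.Int.mod] using pymod_one m h2
  simp [modinvP, e1, PySem.Int.mod?]
  exact ⟨by omega, hf⟩

-- assembly for a nonempty instruction list
theorem spec_cons (m : Int) (hm : 0 < m) (l : String) (L : List String)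
    (hv : ∀ s ∈ (l :: L), validLine m s = true) :
    compute_coefficients_reverse m (l :: L) = compute_coefficients_reverse_alt m (l :: L) := by
  have hm0 : m ≠ 0 := by omega
  set L0 : List String := l :: L with hL0
  set ts : List (Int × Int) := L0.map (fwdCo m) with hts
  set isv : List (Int × Int) := L0.reverse.map (invCo m) with hisv
  set aR : Int × Int := isv.foldl (rstep m) (1, 0) with haR
  set aM : Int × Int := isv.foldl mstep (1, 0) with haM
  set bM : Int × Int := ts.foldl mstep (1, 0) with hbM
  -- A computes the reduced reverse fold
  have hAfold : L0.reverse.foldl (stepA m) (some (1, 0)) = some aR := by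
    rw [foldA_eq m hm L0.reverse (fun s hs => hv s (List.mem_reverse.mp hs)) (1, 0)]
    rw [haR, hisv, List.foldl_map]
  -- B's stage 1 parses everything; its stage 2 is the exact fold bM
  have hparse : parseAll m L0 = some ts := parseAll_eq m L0 hv
  -- bounds and congruences for A's side
  have hne1 : isv ≠ [] := by simp [hisv, hL0]
  have hbA := rfold_bounds m hm isv hne1 (1, 0)
  have hcA := rfold_modeq m hm isv (1, 0) (1, 0) Int.ModEq.rfl Int.ModEq.rfl
  obtain ⟨c1, c2⟩ := core m hm L0 hv
  -- B reduces bM.1 once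
  set x : Int := PySem.Int.mod bM.1 m with hx
  have hxmod : PySem.Int.mod? bM.1 m = some x := by simp [PySem.Int.mod?, PySem.Int.mod, hm0, hx]
  have hxcong : Int.ModEq m x bM.1 := by
    rw [hx, PySem.Int.mod_eq_emod_of_pos hm]; exact Int.mod_modEq _ m
  have hxb : 0 ≤ x ∧ x < m := ⟨PySem.Int.mod_nonneg _ hm, PySem.Int.mod_lt _ hm⟩
  -- x is invertible mod m
  have hinv : Int.ModEq m (aM.1 * x) 1 := ((hxcong.mul_left aM.1).trans c1)
  have hgcd : Int.gcd x m = 1 := by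
    have hd1 : (↑(Int.gcd x m) : Int) ∣ aM.1 * x :=
      Dvd.dvd.mul_left (Int.gcd_dvd_left x m) aM.1
    have hd2 : (↑(Int.gcd x m) : Int) ∣ 1 - aM.1 * x :=
      dvd_trans (Int.gcd_dvd_right x m) hinv.dvd
    have : (↑(Int.gcd x m) : Int) ∣ 1 := by
      have := dvd_add hd1 hd2; simpa using this
    have := Int.eq_one_of_dvd_one (by positivity) this
    exact_mod_cast this
  obtain ⟨r, hr, hr0, hrm, hri⟩ := modinvP_some x m hm hxb.1 hgcd
  have hri' : Int.ModEq m (bM.1 * r) 1 := ((hxcong.symm.mul_right r).trans hri)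
  -- B's result
  have hmodB : PySem.Int.mod? (-r * bM.2) m = some (PySem.Int.mod (-r * bM.2) m) := by
    simp [PySem.Int.mod?, PySem.Int.mod, hm0]
  have halt : compute_coefficients_reverse_alt m L0 = (r, PySem.Int.mod (-r * bM.2) m) := by
    rw [compute_coefficients_reverse_alt, hparse]
    simp only [← hbM, hxmod, hr, hmodB]
  -- A's result equals it, component by component
  have e1 : aR.1 = r := by
    refine eq_of_modeq_bounds ?_ hbA.1 ⟨hr0, hrm⟩
    calc aR.1 ≡ aM.1 [ZMOD m] := hcA.1
      _ = aM.1 * 1 := by ring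
      _ ≡ aM.1 * (bM.1 * r) [ZMOD m] := hri'.symm.mul_left aM.1
      _ = (aM.1 * bM.1) * r := by ring
      _ ≡ 1 * r [ZMOD m] := c1.mul_right r
      _ = r := by ring
  have e2 : aR.2 = PySem.Int.mod (-r * bM.2) m := by
    refine eq_of_modeq_bounds ?_ hbA.2 ⟨PySem.Int.mod_nonneg _ hm, PySem.Int.mod_lt _ hm⟩
    have hmm : Int.ModEq m (PySem.Int.mod (-r * bM.2) m) (-r * bM.2) := by
      rw [PySem.Int.mod_eq_emod_of_pos hm]; exact Int.mod_modEq _ m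
    calc aR.2 ≡ aM.2 [ZMOD m] := hcA.2
      _ = aM.2 * 1 := by ring
      _ ≡ aM.2 * (bM.1 * r) [ZMOD m] := hri'.symm.mul_left aM.2
      _ = (bM.1 * aM.2) * r := by ring
      _ ≡ (-bM.2) * r [ZMOD m] := by
          refine Int.ModEq.mul_right r ?_
          have c2' : Int.ModEq m (bM.1 * aM.2 + bM.2) 0 := c2
          calc bM.1 * aM.2 = (bM.1 * aM.2 + bM.2) - bM.2 := by ring
            _ ≡ 0 - bM.2 [ZMOD m] := c2'.sub (Int.ModEq.refl bM.2)
            _ = -bM.2 := by ring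
      _ = -r * bM.2 := by ring
      _ ≡ PySem.Int.mod (-r * bM.2) m [ZMOD m] := hmm.symm
  have hAval : compute_coefficients_reverse m L0 = aR := by
    rw [compute_coefficients_reverse, hAfold]; rfl
  rw [hAval, halt, Prod.ext_iff]
  exact ⟨e1, e2⟩

-- ===== VERDICT (by name: the statement is the Claim_ definition above) =====
theorem compute_coefficients_reverse_spec : Claim_equal_compute_coefficients_reverse := by
  intro m lines _ hpre
  obtain ⟨hm, hemp, hall⟩ := hpre
  have hv : ∀ s ∈ lines, validLine m s = true := List.all_eq_true.mp hall
  show _ = compute_coefficients_reverse_alt m lines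
  cases lines with
  | nil =>
    have h2 := hemp rfl
    have hA : compute_coefficients_reverse m [] = (1, 0) := rfl
    have hB : compute_coefficients_reverse_alt m [] = (1, 0) := by
      have hm0 : m ≠ 0 := by omega
      have hx : PySem.Int.mod? (1 : Int) m = some 1 := by
        have h1 : Int.fmod 1 m = 1 := by simpa [PySem.Int.mod] using pymod_one m h2
        simp [PySem.Int.mod?, hm0, h1]
      have h0 : PySem.Int.mod? ((-1 : Int) * 0) m = some 0 := by
        simp [PySem.Int.mod?, hm0]
      rw [compute_coefficients_reverse_alt]
      simp only [parseAll, List.foldl_nil, hx, modinvP_one m h2, h0]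
    rw [hA, hB]
  | cons l L => exact spec_cons m hm l L hv
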